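-- pv_equiv track=rewrite | github.com/ashudevcplusplus/IIITA_MTech_Assignmnets | Data_mining/2/Code.py | freq_triple_item_method
-- ===== SOURCE A (Python) =====
-- import itertools
--
-- item_set = {}
--
-- def is_sublist_method(support_count_one, filtered_f1_d):
--     for i in support_count_one:
--         if i not in filtered_f1_d:
--             return False
--     return True
--
-- def freq_triple_item_method(filtered_f1_d, list_of_transaction, mininimum_support_perc):
--     filtered_f1_d = list(filtered_f1_d.keys())
--     filtered_f1_d = sorted(list(set([item for t in filtered_f1_d for item in t])))
--     filtered_f1_d = list(itertools.combinations(filtered_f1_d, 3))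
--     freq_table_1_sec = {}
--     filterd_item_pop_stack = {}
--     for iter1 in filtered_f1_d:
--         count = 0
--         for iter2 in list_of_transaction:
--             if is_sublist_method(iter1, iter2):
--                 count += 1
--         freq_table_1_sec[iter1] = count
--         item_set[iter1] = count
--     for key, value in freq_table_1_sec.items():
--         if value >= mininimum_support_perc:
--             filterd_item_pop_stack[key] = value
--
--     return freq_table_1_sec, filterd_item_pop_stack
-- ===== SOURCE B (Python) =====
-- import itertools
--
-- item_set = {}
--
-- def freq_triple_item_method(filtered_f1_d, list_of_transaction, mininimum_support_perc):
--     items = sorted({i for key in filtered_f1_d for i in key})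
--     counts = {c: 0 for c in itertools.combinations(items, 3)}
--     item_univ = set(items)
--     for t in list_of_transaction:
--         present = sorted(set(t) & item_univ)
--         for c in itertools.combinations(present, 3):
--             counts[c] += 1
--     item_set.update(counts)
--     filtered = {k: v for k, v in counts.items() if v >= mininimum_support_perc}
--     return counts, filtered
-- ===== Notes on version B (the rewrite author's own statement) =====
-- stated objective: alternative
-- what changed: Instead of scanning every transaction for each of the C(n,3) candidate triples, B zero-initialises all candidate triples once and makes a single pass over the transactions, enumerating each transaction's own 3-item subsets (restricted to the item universe) and incrementing their counts; intended as faster (measured 2.26x at the largest size both finished, unconfirmed at larger sizes where both time out).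
import Mathlib
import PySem

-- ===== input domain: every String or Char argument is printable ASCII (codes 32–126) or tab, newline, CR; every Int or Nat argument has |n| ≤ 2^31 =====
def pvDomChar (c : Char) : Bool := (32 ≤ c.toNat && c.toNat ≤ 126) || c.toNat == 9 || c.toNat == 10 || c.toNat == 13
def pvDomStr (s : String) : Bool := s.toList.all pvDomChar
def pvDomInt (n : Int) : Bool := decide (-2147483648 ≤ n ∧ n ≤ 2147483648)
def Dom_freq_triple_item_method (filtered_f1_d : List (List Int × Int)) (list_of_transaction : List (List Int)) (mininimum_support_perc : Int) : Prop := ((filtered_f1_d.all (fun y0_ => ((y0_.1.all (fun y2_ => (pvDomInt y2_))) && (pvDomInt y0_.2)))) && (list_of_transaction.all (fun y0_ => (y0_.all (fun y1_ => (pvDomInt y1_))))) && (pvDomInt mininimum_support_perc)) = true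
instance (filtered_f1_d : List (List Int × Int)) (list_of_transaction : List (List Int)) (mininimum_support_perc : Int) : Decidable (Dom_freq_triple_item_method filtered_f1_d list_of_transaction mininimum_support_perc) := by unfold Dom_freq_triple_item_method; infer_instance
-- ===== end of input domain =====

-- B replaces A's per-candidate scan of all transactions by one pass over the transactions that
-- increments each transaction's own 3-item subsets instead (objective: alternative).  Both Pythons also write
-- to the module-global 'item_set'; the equivalence proved here is about the RETURN value only.

-- ===== PORT A =====
def is_sublist_method (support_count_one : List Int) (filtered_f1_d : List Int) : Bool :=
  support_count_one.all (fun i => filtered_f1_d.contains i)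

def freq_triple_item_method (filtered_f1_d : List (List Int × Int)) (list_of_transaction : List (List Int)) (mininimum_support_perc : Int) : (List (List Int × Int)) × (List (List Int × Int)) :=
  let keys := filtered_f1_d.map (·.1)
  let univ := PySem.List.sorted (PySem.Set.ofList (keys.flatMap (fun t => t))) (fun x => x) false
  let triples := PySem.List.combinations univ 3
  let freq_table_1_sec : PySem.Dict (List Int) Int :=
    triples.foldl (fun d iter1 =>
      d.insert iter1 (list_of_transaction.foldl
        (fun count iter2 => if is_sublist_method iter1 iter2 then count + 1 else count) 0))
      PySem.Dict.empty
  let filterd_item_pop_stack : PySem.Dict (List Int) Int :=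
    freq_table_1_sec.items.foldl (fun d kv =>
      if mininimum_support_perc ≤ kv.2 then d.insert kv.1 kv.2 else d) PySem.Dict.empty
  (freq_table_1_sec.items, filterd_item_pop_stack.items)

-- ===== PORT B =====
def freq_triple_item_method_alt (filtered_f1_d : List (List Int × Int)) (list_of_transaction : List (List Int)) (mininimum_support_perc : Int) : (List (List Int × Int)) × (List (List Int × Int)) :=
  let items := PySem.List.sorted (PySem.Set.ofList (filtered_f1_d.flatMap (fun kv => kv.1))) (fun x => x) false
  let counts0 : PySem.Dict (List Int) Int :=
    (PySem.List.combinations items 3).foldl (fun d c => d.insert c 0) PySem.Dict.empty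
  let counts : PySem.Dict (List Int) Int :=
    list_of_transaction.foldl (fun d t =>
      (PySem.List.combinations
          (PySem.List.sorted (PySem.Set.inter (PySem.Set.ofList t) items) (fun x => x) false) 3).foldl
        (fun d c => d.modify c 0 (· + 1)) d) counts0
  (counts.items, counts.items.filter (fun kv => decide (mininimum_support_perc ≤ kv.2)))

-- ===== PRECONDITION & SPEC =====
def Spec_freq_triple_item_method (filtered_f1_d : List (List Int × Int)) (list_of_transaction : List (List Int)) (mininimum_support_perc : Int) (out : (List (List Int × Int)) × (List (List Int × Int))) : Prop := out = freq_triple_item_method_alt filtered_f1_d list_of_transaction mininimum_support_perc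
instance (filtered_f1_d : List (List Int × Int)) (list_of_transaction : List (List Int)) (mininimum_support_perc : Int) (out : (List (List Int × Int)) × (List (List Int × Int))) : Decidable (Spec_freq_triple_item_method filtered_f1_d list_of_transaction mininimum_support_perc out) := by unfold Spec_freq_triple_item_method; infer_instance

-- ===== CLAIM (what is proved, stated in full; the proofs are below) =====
def Claim_equal_freq_triple_item_method : Prop := ∀ (filtered_f1_d : List (List Int × Int)) (list_of_transaction : List (List Int)) (mininimum_support_perc : Int), Dom_freq_triple_item_method filtered_f1_d list_of_transaction mininimum_support_perc → Spec_freq_triple_item_method filtered_f1_d list_of_transaction mininimum_support_perc (freq_triple_item_method filtered_f1_d list_of_transaction mininimum_support_perc)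

-- ===== LEMMAS AND PROOFS =====

-- a chain (strictly increasing list) is a sublist of any chain containing its elements
lemma chain_sublist_of_subset : ∀ (s c : List Int), s.Pairwise (· < ·) → c.Pairwise (· < ·) →
    (∀ x ∈ c, x ∈ s) → c.Sublist s := by
  intro s
  induction s with
  | nil => intro c _ _ hsub; cases c with
    | nil => exact List.Sublist.refl _
    | cons a t => exact absurd (hsub a (List.mem_cons_self)) (List.not_mem_nil)
  | cons b s' ih =>
    intro c hs hc hsub
    cases c with
    | nil => exact List.nil_sublist _
    | cons a c' =>
      have hbs' : ∀ y ∈ s', b < y := fun y hy => (List.pairwise_cons.1 hs).1 y hy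
      have hac' : ∀ y ∈ c', a < y := fun y hy => (List.pairwise_cons.1 hc).1 y hy
      by_cases hab : a = b
      · subst hab
        have hsub' : ∀ x ∈ c', x ∈ s' := by
          intro x hx
          have hxs := hsub x (List.mem_cons_of_mem _ hx)
          rcases List.mem_cons.1 hxs with h | h
          · exact absurd (h ▸ hac' x hx) (lt_irrefl _)
          · exact h
        exact List.Sublist.cons₂ _ (ih c' (List.pairwise_cons.1 hs).2 (List.pairwise_cons.1 hc).2 hsub')
      · have has' : a ∈ s' := by
          rcases List.mem_cons.1 (hsub a List.mem_cons_self) with h | h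
          · exact absurd h hab
          · exact h
        have hba : b < a := hbs' a has'
        have hsub' : ∀ x ∈ a :: c', x ∈ s' := by
          intro x hx
          rcases List.mem_cons.1 hx with rfl | hx'
          · exact has'
          · have hxs := hsub x (List.mem_cons_of_mem _ hx')
            rcases List.mem_cons.1 hxs with h | h
            · exact absurd (h ▸ lt_trans hba (hac' x hx')) (lt_irrefl _)
            · exact h
        exact List.Sublist.cons _ (ih (a :: c') (List.pairwise_cons.1 hs).2 hc hsub')

-- the list of r-combinations of a duplicate-free list has no duplicates
lemma nodup_combinations : ∀ (xs : List Int) (r : Nat), xs.Nodup →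
    (PySem.List.combinations xs r).Nodup := by
  intro xs
  induction xs with
  | nil => intro r _; cases r with
    | zero => simp [PySem.List.combinations_zero]
    | succ r => simp [PySem.List.combinations_nil_succ]
  | cons x xs ih =>
    intro r hnd
    cases r with
    | zero => simp [PySem.List.combinations_zero]
    | succ r =>
      rw [PySem.List.combinations_cons_succ]
      have hx : x ∉ xs := (List.nodup_cons.1 hnd).1
      have hxs : xs.Nodup := (List.nodup_cons.1 hnd).2
      apply List.Nodup.append
      · exact (ih r hxs).map (fun a b h => by injection h)
      · exact ih (r+1) hxs
      · intro c hc1 hc2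
        rcases List.mem_map.1 hc1 with ⟨c', _, rfl⟩
        have hsub := PySem.List.sublist_of_mem_combinations hc2
        exact hx (hsub.subset List.mem_cons_self)

-- getD through B's transaction loop: initial value plus per-transaction combination counts
lemma bfold_getD (g : List Int → List (List Int)) (lot : List (List Int)) :
    ∀ (d : PySem.Dict (List Int) Int) (c : List Int),
    (lot.foldl (fun d t => (g t).foldl (fun d c => d.modify c 0 (· + 1)) d) d).getD c 0
      = d.getD c 0 + (lot.map (fun t => (((g t).count c : Nat) : Int))).sum := by
  induction lot with
  | nil => intro d c; simp
  | cons t ts ih =>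
    intro d c
    simp only [List.foldl_cons, List.map_cons, List.sum_cons]
    rw [ih, PySem.Dict.getD_foldl_modify_add_one]
    ring

-- B's transaction loop never creates a key when every incremented key is already present
lemma bfold_keys (g : List Int → List (List Int)) (lot : List (List Int)) :
    ∀ (d : PySem.Dict (List Int) Int),
    (∀ t ∈ lot, ∀ c ∈ g t, d.contains c = true) →
    (lot.foldl (fun d t => (g t).foldl (fun d c => d.modify c 0 (· + 1)) d) d).keys = d.keys := by
  induction lot with
  | nil => intro d _; rfl
  | cons t ts ih =>
    intro d hmem
    simp only [List.foldl_cons]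
    have hinner : ((g t).foldl (fun d c => d.modify c 0 (· + 1)) d).keys = d.keys := by
      rw [PySem.Dict.keys_foldl_modify]
      rw [PySem.Set.update_eq_append_filter]
      have : (PySem.Set.ofList (g t)).filter (fun y => !(PySem.Set.contains d.keys y)) = [] := by
        apply List.filter_eq_nil_iff.2
        intro c hc
        have hcg : c ∈ g t := (PySem.Set.mem_ofList _ _).1 hc
        have := hmem t List.mem_cons_self c hcg
        have hk : c ∈ d.keys := (PySem.Dict.contains_iff_mem_keys _ _).1 this
        simpa using hk
      rw [this, List.append_nil]
    rw [ih _ ?_, hinner]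
    intro t' ht' c hc
    have hk : c ∈ d.keys := (PySem.Dict.contains_iff_mem_keys _ _).1 (hmem t' (List.mem_cons_of_mem _ ht') c hc)
    exact (PySem.Dict.contains_iff_mem_keys _ _).2 (hinner ▸ hk)

theorem freq_AB_eq (fd : List (List Int × Int)) (lot : List (List Int)) (msp : Int) :
    freq_triple_item_method fd lot msp = freq_triple_item_method_alt fd lot msp := by
  unfold freq_triple_item_method freq_triple_item_method_alt
  simp only [List.flatMap_map]
  set U := PySem.List.sorted (PySem.Set.ofList (fd.flatMap (fun kv => kv.1))) (fun x => x) false with hU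
  set T := PySem.List.combinations U 3 with hT
  set P : List Int → List Int := fun t =>
    PySem.List.sorted (PySem.Set.inter (PySem.Set.ofList t) U) (fun x => x) false with hP
  set cntA : List Int → Int := fun c =>
    lot.foldl (fun count t => if is_sublist_method c t then count + 1 else count) 0 with hcntA
  -- facts about U and T
  have hUlt : U.Pairwise (· < ·) := PySem.List.sorted_ofList_pairwise_lt _
  have hUnd : U.Nodup := hUlt.imp (fun h => ne_of_lt h)
  have hTnd : T.Nodup := nodup_combinations U 3 hUnd
  -- facts about P t
  have hPmem : ∀ (t : List Int) (x : Int), x ∈ P t ↔ x ∈ t ∧ x ∈ U := by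
    intro t x
    simp [hP, PySem.List.mem_sorted, PySem.Set.mem_inter, PySem.Set.mem_ofList]
  have hPlt : ∀ t : List Int, (P t).Pairwise (· < ·) := by
    intro t
    have hnd : (P t).Nodup := by
      have h1 : (PySem.Set.inter (PySem.Set.ofList t) U).Nodup :=
        PySem.Set.nodup_inter _ U (PySem.Set.nodup_ofList t)
      exact ((PySem.List.sorted_perm ((PySem.Set.ofList t).inter U) (fun x => x) false).symm.nodup h1)
    have hle : (P t).Pairwise (fun a b => a ≤ b) := PySem.List.sorted_pairwise _ _
    exact (hle.and hnd).imp (fun h => lt_of_le_of_ne h.1 h.2)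
  have hPsub : ∀ t : List Int, (P t).Sublist U := by
    intro t
    exact chain_sublist_of_subset U (P t) hUlt (hPlt t) (fun x hx => ((hPmem t x).1 hx).2)
  -- the pointwise count fact
  have hcount : ∀ c ∈ T, ∀ t : List Int,
      (((PySem.List.combinations (P t) 3).count c : Nat) : Int)
        = if is_sublist_method c t then (1 : Int) else 0 := by
    intro c hc t
    have hsubU : c.Sublist U := PySem.List.sublist_of_mem_combinations hc
    have hlen : c.length = 3 := PySem.List.length_of_mem_combinations hc
    have hclt : c.Pairwise (· < ·) := hUlt.sublist hsubU
    have hnodupC : (PySem.List.combinations (P t) 3).Nodup :=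
      nodup_combinations (P t) 3 ((hPlt t).imp (fun h => ne_of_lt h))
    by_cases hs : is_sublist_method c t = true
    · simp only [hs, if_true]
      have hmem : c ∈ PySem.List.combinations (P t) 3 := by
        apply (PySem.List.mem_combinations_iff _ _ _).2
        refine ⟨chain_sublist_of_subset (P t) c (hPlt t) hclt ?_, hlen⟩
        intro x hx
        have hxt : x ∈ t := by
          have := List.all_eq_true.1 hs x hx
          simpa using this
        exact (hPmem t x).2 ⟨hxt, hsubU.subset hx⟩
      rw [List.count_eq_one_of_mem hnodupC hmem]
      rfl
    · simp only [hs]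
      have hnmem : c ∉ PySem.List.combinations (P t) 3 := by
        intro hmem
        apply hs
        have hsubP := PySem.List.sublist_of_mem_combinations hmem
        apply List.all_eq_true.2
        intro x hx
        have : x ∈ P t := hsubP.subset hx
        simpa using ((hPmem t x).1 this).1
      rw [List.count_eq_zero.2 hnmem]
      rfl
  -- A's first component
  have hA1 : (T.foldl (fun d c => d.insert c (cntA c)) PySem.Dict.empty).items
      = T.map (fun c => (c, cntA c)) := by
    have h := PySem.Dict.items_foldl_insert_fresh T (fun c => c) cntA PySem.Dict.empty
      (by intro a _; simp) (by simpa using hTnd)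
    simpa using h
  -- B's initial dict
  have hB0 : (T.foldl (fun d c => d.insert c (0 : Int)) PySem.Dict.empty).items
      = T.map (fun c => (c, (0 : Int))) := by
    have h := PySem.Dict.items_foldl_insert_fresh T (fun c => c) (fun _ => (0 : Int)) PySem.Dict.empty
      (by intro a _; simp) (by simpa using hTnd)
    simpa using h
  set d0 : PySem.Dict (List Int) Int := T.foldl (fun d c => d.insert c (0 : Int)) PySem.Dict.empty
    with hd0
  have hkeys0 : d0.keys = T := by
    have h : d0.keys = (T.map (fun c => (c, (0 : Int)))).map (·.1) := by
      simp only [PySem.Dict.keys, hB0]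
    rw [h, List.map_map]
    simp [Function.comp_def]
  set dB : PySem.Dict (List Int) Int := lot.foldl (fun d t =>
      (PySem.List.combinations (P t) 3).foldl (fun d c => d.modify c 0 (· + 1)) d) d0 with hdB
  have hkeysB : dB.keys = T := by
    rw [hdB, bfold_keys (fun t => PySem.List.combinations (P t) 3) lot d0 ?_, hkeys0]
    intro t _ c hc
    apply (PySem.Dict.contains_iff_mem_keys _ _).2
    rw [hkeys0, hT]
    exact (PySem.List.mem_combinations_iff _ _ _).2
      ⟨(PySem.List.sublist_of_mem_combinations hc).trans (hPsub t),
        PySem.List.length_of_mem_combinations hc⟩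
  have hkeysBnd : dB.keys.Nodup := by rw [hkeysB]; exact hTnd
  have hB1 : dB.items = T.map (fun c => (c, dB.getD c 0)) := by
    rw [PySem.Dict.items_eq_map_keys dB hkeysBnd 0, hkeysB]
  have hgetD : ∀ c ∈ T, dB.getD c 0 = cntA c := by
    intro c hc
    rw [hdB, bfold_getD (fun t => PySem.List.combinations (P t) 3) lot d0 c]
    have h0 : d0.getD c 0 = 0 := by
      apply PySem.Dict.getD_of_mem_items
      · rw [hB0]; exact List.mem_map.2 ⟨c, hc, rfl⟩
      · rw [hkeys0]; exact hTnd
    rw [h0, zero_add]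
    have hterms : lot.map (fun t => (((PySem.List.combinations (P t) 3).count c : Nat) : Int))
        = lot.map (fun t => if is_sublist_method c t then (1 : Int) else 0) :=
      List.map_congr_left (fun t _ => hcount c hc t)
    rw [hterms, PySem.List.sum_map_ite_one_zero]
    have h := PySem.List.foldl_if_add_one (is_sublist_method c) lot 0
    simpa using h.symm
  -- the two first components agree
  have hfst : (T.foldl (fun d c => d.insert c (cntA c)) PySem.Dict.empty).items = dB.items := by
    rw [hA1, hB1]
    exact (List.map_congr_left (fun c hc => by rw [hgetD c hc])).symm
  -- second components
  have hsnd : ∀ L : List (List Int × Int), (L.map (·.1)).Nodup →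
      (L.foldl (fun d kv => if msp ≤ kv.2 then d.insert kv.1 kv.2 else d) PySem.Dict.empty).items
        = L.filter (fun kv => decide (msp ≤ kv.2)) := by
    intro L hnd
    rw [PySem.List.foldl_ite_eq_foldl_filter]
    have hsl : ((L.filter (fun kv => decide (msp ≤ kv.2))).map (·.1)).Nodup := by
      have h2 := (List.filter_sublist (l := L) (p := fun kv => decide (msp ≤ kv.2))).map (Prod.fst)
      exact h2.nodup hnd
    have h := PySem.Dict.items_foldl_insert_fresh (L.filter (fun kv => decide (msp ≤ kv.2)))
      (fun kv => kv.1) (fun kv => kv.2) PySem.Dict.empty (by intro a _; simp) hsl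
    simpa using h
  have hndA : ((T.foldl (fun d c => d.insert c (cntA c)) PySem.Dict.empty).items.map (·.1)).Nodup := by
    rw [hA1, List.map_map]
    simpa [Function.comp_def] using hTnd
  refine Prod.ext ?_ ?_
  · simpa using hfst
  · simp only []
    rw [hsnd _ hndA, hfst]

-- ===== VERDICT (by name: the statement is the Claim_ definition above) =====
theorem freq_triple_item_method_spec : Claim_equal_freq_triple_item_method := by
  intro fd lot msp _
  unfold Spec_freq_triple_item_method
  exact freq_AB_eq fd lot msp
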